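-- pv_equiv track=rewrite | github.com/Lefnui/ctf-writeups | 2019/de1ctf/crypto/xorz/solve.py | applyHistogram
-- ===== SOURCE A (Python) =====
-- def applyHistogram(uk_histo, ref_histo):
--     uk_ordered =  sorted(uk_histo, key=uk_histo.__getitem__, reverse=True)
--     matches = []
--     M = 0
--     key = uk_ordered[0]
--     keys = {}
--     for u in uk_ordered:
--         for r in ref_histo.keys():
--             k = u ^ r
--             count = compareHistogram(uk_ordered, uk_histo, ref_histo, k)
--             keys[k] = count
--     keys_s =  sorted(keys, key=keys.__getitem__, reverse=True)
--     return keys_s[0]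
--
-- def compareHistogram(uk_keys, uk_values, ref, key):
--     count = 0
--     for u in uk_keys:
--         x = u ^ key
--         if x in ref.keys():
--             count += uk_values[u] * ref[x]
--     return count
-- ===== SOURCE B (Python) =====
-- def applyHistogram(uk_histo, ref_histo):
--     # XOR-convolution: accumulate every key's score in one pass over (u, r) pairs,
--     # instead of re-scoring each candidate key from scratch.  The sort only fixes
--     # the first-inserted tie-break order; max() takes the first maximal key.
--     uk_ordered = sorted(uk_histo, key=uk_histo.__getitem__, reverse=True)
--     scores = {}
--     for u in uk_ordered:
--         uv = uk_histo[u]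
--         for r, rv in ref_histo.items():
--             k = u ^ r
--             scores[k] = scores.get(k, 0) + uv * rv
--     return max(scores, key=scores.get)
-- ===== Notes on version B (the rewrite author's own statement) =====
-- stated objective: faster
-- what changed: Instead of re-running compareHistogram (a full O(|uk|) scoring pass) for every (u, r) candidate pair, B accumulates each candidate key's score in a single XOR-convolution pass scores[u^r] += uk[u]*ref[r] over all pairs, and returns the first score-maximal key with max().
import Mathlib
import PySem

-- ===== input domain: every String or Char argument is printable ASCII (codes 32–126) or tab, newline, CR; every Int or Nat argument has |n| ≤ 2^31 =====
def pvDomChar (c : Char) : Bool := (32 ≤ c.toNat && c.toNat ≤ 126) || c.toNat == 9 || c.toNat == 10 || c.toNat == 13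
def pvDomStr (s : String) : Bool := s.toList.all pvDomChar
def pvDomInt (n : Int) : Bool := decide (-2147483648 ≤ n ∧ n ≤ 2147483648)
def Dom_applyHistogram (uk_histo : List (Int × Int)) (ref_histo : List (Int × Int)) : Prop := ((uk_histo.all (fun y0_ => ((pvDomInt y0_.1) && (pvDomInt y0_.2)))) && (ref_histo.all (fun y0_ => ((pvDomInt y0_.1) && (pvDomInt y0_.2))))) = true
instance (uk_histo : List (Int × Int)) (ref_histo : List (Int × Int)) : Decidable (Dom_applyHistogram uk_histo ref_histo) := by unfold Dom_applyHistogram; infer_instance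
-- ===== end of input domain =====

-- B replaces A's re-scoring of every candidate key by a single XOR-convolution pass
-- that accumulates each key's score once, and takes the first maximal key with max().


-- ===== PORT A =====
def compareHistogram (uk_keys : List Int) (uk_values : PySem.Dict Int Int) (ref : PySem.Dict Int Int) (key : Int) : Int :=
  uk_keys.foldl (fun count u =>
    let x := PySem.Int.bxor u key
    if ref.contains x then count + uk_values.getD u 0 * ref.getD x 0 else count) 0

-- Python's locals `matches`, `M` and `key = uk_ordered[0]` are never used for the result;
-- `uk_ordered[0]` / `keys_s[0]` raise IndexError on an empty dict — excluded by Pre_.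
def applyHistogram (uk_histo : List (Int × Int)) (ref_histo : List (Int × Int)) : Int :=
  let ukd := PySem.Dict.ofList uk_histo
  let refd := PySem.Dict.ofList ref_histo
  let uk_ordered := PySem.List.sorted ukd.keys (fun u => ukd.getD u 0) true
  let keys := uk_ordered.foldl (fun d u =>
      refd.keys.foldl (fun d r =>
        let k := PySem.Int.bxor u r
        d.insert k (compareHistogram uk_ordered ukd refd k)) d)
    PySem.Dict.empty
  let keys_s := PySem.List.sorted keys.keys (fun k => keys.getD k 0) true
  match keys_s with
  | [] => 0          -- Python: keys_s[0] raises IndexError here; outside Pre_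
  | k :: _ => k

-- ===== PORT B =====
def applyHistogram_alt (uk_histo : List (Int × Int)) (ref_histo : List (Int × Int)) : Int :=
  let ukd := PySem.Dict.ofList uk_histo
  let refd := PySem.Dict.ofList ref_histo
  let uk_ordered := PySem.List.sorted ukd.keys (fun u => ukd.getD u 0) true
  let scores := uk_ordered.foldl (fun d u =>
      let uv := ukd.getD u 0
      refd.items.foldl (fun d rp =>
        let k := PySem.Int.bxor u rp.1
        d.insert k (d.getD k 0 + uv * rp.2)) d)
    PySem.Dict.empty
  match PySem.List.max? scores.keys (fun k => scores.getD k 0) with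
  | none => 0        -- Python: max() raises ValueError here; outside Pre_
  | some k => k

-- ===== PRECONDITION & SPEC =====
-- Python A raises IndexError when either dict is empty (uk_ordered[0] resp. keys_s[0]).
def Pre_applyHistogram (uk_histo : List (Int × Int)) (ref_histo : List (Int × Int)) : Prop :=
  uk_histo ≠ [] ∧ ref_histo ≠ []
instance (uk_histo : List (Int × Int)) (ref_histo : List (Int × Int)) : Decidable (Pre_applyHistogram uk_histo ref_histo) := by unfold Pre_applyHistogram; infer_instance
def pvWitness_applyHistogram : (List (Int × Int)) × (List (Int × Int)) := ([(1, 2), (3, 1)], [(0, 1)])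
def Spec_applyHistogram (uk_histo : List (Int × Int)) (ref_histo : List (Int × Int)) (out : Int) : Prop := out = applyHistogram_alt uk_histo ref_histo
instance (uk_histo : List (Int × Int)) (ref_histo : List (Int × Int)) (out : Int) : Decidable (Spec_applyHistogram uk_histo ref_histo out) := by unfold Spec_applyHistogram; infer_instance

-- ===== CLAIM (what is proved, stated in full; the proofs are below) =====
def Claim_equal_applyHistogram : Prop := ∀ (uk_histo : List (Int × Int)) (ref_histo : List (Int × Int)), Dom_applyHistogram uk_histo ref_histo → Pre_applyHistogram uk_histo ref_histo → Spec_applyHistogram uk_histo ref_histo (applyHistogram uk_histo ref_histo)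

-- ===== LEMMAS AND PROOFS =====

-- `a ^ (a ^ b) = b`: XOR by a fixed value is an involution.
theorem pv_bxor_cancel (a b : Int) : PySem.Int.bxor a (PySem.Int.bxor a b) = b := by
  unfold PySem.Int.bxor
  by_cases ha : (0:Int) ≤ a <;> by_cases hb : (0:Int) ≤ b
  · have h0 : (0:Int) ≤ ↑(a.toNat ^^^ b.toNat) := Int.natCast_nonneg _
    simp only [if_pos ha, if_pos hb, if_pos h0, Int.toNat_natCast,
      ← Nat.xor_assoc, Nat.xor_self, Nat.zero_xor]
    omega
  · have h0 : ¬ (0:Int) ≤ -↑(a.toNat ^^^ (-b - 1).toNat) - 1 := by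
      have := Int.natCast_nonneg (a.toNat ^^^ (-b - 1).toNat); omega
    simp only [if_pos ha, if_neg hb, if_neg h0]
    have h1 : (-(-(↑(a.toNat ^^^ (-b - 1).toNat) : Int) - 1) - 1) = ↑(a.toNat ^^^ (-b - 1).toNat) := by ring
    rw [h1, Int.toNat_natCast, ← Nat.xor_assoc, Nat.xor_self, Nat.zero_xor]
    omega
  · have h0 : ¬ (0:Int) ≤ -↑((-a - 1).toNat ^^^ b.toNat) - 1 := by
      have := Int.natCast_nonneg ((-a - 1).toNat ^^^ b.toNat); omega
    simp only [if_neg ha, if_pos hb, if_neg h0]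
    have h1 : (-(-(↑((-a - 1).toNat ^^^ b.toNat) : Int) - 1) - 1) = ↑((-a - 1).toNat ^^^ b.toNat) := by ring
    rw [h1, Int.toNat_natCast, ← Nat.xor_assoc, Nat.xor_self, Nat.zero_xor]
    omega
  · have h0 : (0:Int) ≤ ↑((-a - 1).toNat ^^^ (-b - 1).toNat) := Int.natCast_nonneg _
    simp only [if_neg ha, if_neg hb, if_pos h0]
    have h1 : (-(↑((-a - 1).toNat ^^^ (-b - 1).toNat) : Int) - 1).toNat = 0 := by
      have := Int.natCast_nonneg ((-a - 1).toNat ^^^ (-b - 1).toNat); omega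
    rw [Int.toNat_natCast, ← Nat.xor_assoc, Nat.xor_self, Nat.zero_xor]
    omega

theorem pv_bxor_eq_iff (u r k : Int) : PySem.Int.bxor u r = k ↔ r = PySem.Int.bxor u k := by
  constructor
  · rintro rfl; rw [pv_bxor_cancel]
  · rintro rfl; rw [pv_bxor_cancel]

-- head of an insertBy step
theorem pv_head?_insertBy {α : Type} (before : α → α → Bool) (x : α) (acc : List α) :
    (PySem.List.insertBy before x acc).head? =
      match acc.head? with
      | none => some x
      | some m => if before x m then some x else some m := by
  cases acc with
  | nil => rfl
  | cons y ys =>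
    show (if before x y then x :: y :: ys else y :: PySem.List.insertBy before x ys).head? = _
    by_cases h : before x y <;> simp [h]

theorem pv_head?_foldl_insertBy {α : Type} (before : α → α → Bool) (xs : List α) (acc : List α) :
    (xs.foldl (fun a x => PySem.List.insertBy before x a) acc).head? =
      xs.foldl (fun o x =>
        match o with
        | none => some x
        | some m => if before x m then some x else some m) acc.head? := by
  induction xs generalizing acc with
  | nil => rfl
  | cons x xs ih =>
    simp only [List.foldl_cons]
    rw [ih, pv_head?_insertBy]

-- head of the stable reverse sort is Python's max(): the FIRST key-maximal element.
theorem pv_head?_sorted_rev_eq_max? {α : Type} (xs : List α) (key : α → Int) :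
    (PySem.List.sorted xs key true).head? = PySem.List.max? xs key := by
  unfold PySem.List.sorted PySem.List.max?
  rw [pv_head?_foldl_insertBy]
  refine PySem.List.foldl_congr_mem xs _ _ _ (fun o x _ => ?_)
  cases o with
  | none => rfl
  | some m => by_cases h : key m < key x <;> simp [h]


theorem pv_max?_fold_congr {α : Type} (f g : α → Int) : ∀ (xs : List α),
    (∀ x ∈ xs, f x = g x) → ∀ (o : Option α), (∀ m ∈ o, f m = g m) →
    xs.foldl (fun acc x =>
      match acc with
      | none => some x
      | some m => if f m < f x then some x else some m) o
    = xs.foldl (fun acc x =>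
      match acc with
      | none => some x
      | some m => if g m < g x then some x else some m) o := by
  intro xs
  induction xs with
  | nil => intro _ o _; rfl
  | cons x xs ih =>
    intro hmem o ho
    have hx : f x = g x := hmem x (by simp)
    simp only [List.foldl_cons]
    cases o with
    | none =>
      exact ih (fun y hy => hmem y (List.mem_cons_of_mem _ hy)) (some x) (by simpa using hx)
    | some m =>
      have hm : f m = g m := ho m (by simp)
      show (xs.foldl _ (if f m < f x then some x else some m))
          = (xs.foldl _ (if g m < g x then some x else some m))
      rw [hm, hx]
      by_cases hc : g m < g x
      · simp only [if_pos hc]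
        exact ih (fun y hy => hmem y (List.mem_cons_of_mem _ hy)) (some x) (by simpa using hx)
      · simp only [if_neg hc]
        exact ih (fun y hy => hmem y (List.mem_cons_of_mem _ hy)) (some m) (by simpa using hm)

theorem pv_max?_congr {α : Type} (xs : List α) (f g : α → Int)
    (h : ∀ x ∈ xs, f x = g x) : PySem.List.max? xs f = PySem.List.max? xs g := by
  unfold PySem.List.max?
  exact pv_max?_fold_congr f g xs h none (by simp)

-- a doubly-nested fold is a fold over the pair list
theorem pv_foldl_nested {α β γ : Type} (xs : List α) (g : α → List β)
    (step : γ → α × β → γ) (init : γ) :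
    xs.foldl (fun d u => (g u).foldl (fun d r => step d (u, r)) d) init
      = (xs.flatMap (fun u => (g u).map (fun r => (u, r)))).foldl step init := by
  induction xs generalizing init with
  | nil => rfl
  | cons x xs ih =>
    simp only [List.foldl_cons, List.flatMap_cons, List.foldl_append, List.foldl_map, ih]

theorem pv_keys_insert (d : PySem.Dict Int Int) (k : Int) (v : Int) :
    (d.insert k v).keys = if k ∈ d.keys then d.keys else d.keys ++ [k] := by
  by_cases h : k ∈ d.keys
  · rw [PySem.Dict.keys_insert_of_contains d v
      (by rw [PySem.Dict.contains_eq_decide_mem_keys]; simpa), if_pos h]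
  · rw [PySem.Dict.keys_insert_of_not_contains d v
      (by rw [PySem.Dict.contains_eq_decide_mem_keys]; simpa), if_neg h]

-- the keys of an insert-fold depend only on the inserted keys, not the values
theorem pv_keys_foldl_eq {β : Type} (l : List β) (g : β → Int)
    (f₁ f₂ : PySem.Dict Int Int → β → Int) (d₁ d₂ : PySem.Dict Int Int)
    (h : d₁.keys = d₂.keys) :
    (l.foldl (fun d p => d.insert (g p) (f₁ d p)) d₁).keys
      = (l.foldl (fun d p => d.insert (g p) (f₂ d p)) d₂).keys := by
  induction l generalizing d₁ d₂ with
  | nil => simpa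
  | cons p l ih =>
    simp only [List.foldl_cons]
    exact ih _ _ (by rw [pv_keys_insert, pv_keys_insert, h])

theorem pv_mem_keys_foldl {β : Type} (l : List β) (g : β → Int)
    (f : PySem.Dict Int Int → β → Int) (d : PySem.Dict Int Int) (k : Int) :
    k ∈ (l.foldl (fun d p => d.insert (g p) (f d p)) d).keys ↔ k ∈ d.keys ∨ k ∈ l.map g := by
  induction l generalizing d with
  | nil => simp
  | cons p l ih =>
    simp only [List.foldl_cons, List.map_cons, List.mem_cons]
    rw [ih]
    rw [PySem.Dict.mem_keys_insert]
    tauto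

-- A's fold: every insert at key k writes the same value C k
theorem pv_getD_foldl_const {β : Type} (l : List β) (g : β → Int) (C : Int → Int)
    (d : PySem.Dict Int Int) (k : Int) :
    (l.foldl (fun d p => d.insert (g p) (C (g p))) d).getD k 0
      = if k ∈ l.map g then C k else d.getD k 0 := by
  induction l generalizing d with
  | nil => simp
  | cons p l ih =>
    simp only [List.foldl_cons, List.map_cons, List.mem_cons]
    rw [ih, PySem.Dict.getD_insert]
    by_cases h1 : k ∈ l.map g
    · simp [h1]
    · by_cases h2 : k = g p <;> simp [h1, h2]

-- B's fold: accumulation sums the weights of the pairs hitting key k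
theorem pv_getD_foldl_acc {β : Type} (l : List β) (g : β → Int) (w : β → Int)
    (d : PySem.Dict Int Int) (k : Int) :
    (l.foldl (fun d p => d.insert (g p) (d.getD (g p) 0 + w p)) d).getD k 0
      = d.getD k 0 + ((l.filter (fun p => g p = k)).map w).sum := by
  induction l generalizing d with
  | nil => simp
  | cons p l ih =>
    simp only [List.foldl_cons, List.filter_cons]
    rw [ih, PySem.Dict.getD_insert]
    by_cases h : k = g p
    · subst h
      simp only [decide_true, if_pos, List.map_cons, List.sum_cons]
      omega
    · have h' : ¬ (g p = k) := fun e => h e.symm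
      simp only [h', decide_false]
      simp [h]

-- the items of a dict with Nodup keys carrying key x: exactly [getD x 0] when present
theorem pv_items_filter_key (d : PySem.Dict Int Int) (h : d.keys.Nodup) (x : Int) :
    ((d.items.filter (fun rp => rp.1 = x)).map (fun rp => rp.2))
      = if d.contains x then [d.getD x 0] else [] := by
  obtain ⟨l⟩ := d
  induction l with
  | nil => simp [PySem.Dict.contains_mk]
  | cons a t ih =>
    obtain ⟨ak, av⟩ := a
    rw [PySem.Dict.keys_mk, List.map_cons] at h
    have hhd : ak ∉ t.map (fun x => x.1) := (List.nodup_cons.mp h).1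
    have htl : ({ items := t } : PySem.Dict Int Int).keys.Nodup := by
      rw [PySem.Dict.keys_mk]; exact (List.nodup_cons.mp h).2
    by_cases hax : ak = x
    · have hnone : t.filter (fun rp => rp.1 = x) = [] := by
        rw [List.filter_eq_nil_iff]
        intro b hb
        simp only [decide_eq_true_eq]
        intro hbx
        exact hhd (hax ▸ hbx ▸ List.mem_map_of_mem hb)
      have hc : ({ items := (ak, av) :: t } : PySem.Dict Int Int).contains x = true := by
        rw [PySem.Dict.contains_mk]
        simp [hax]
      have hg : ({ items := (ak, av) :: t } : PySem.Dict Int Int).getD x 0 = av := by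
        simp [PySem.Dict.getD, PySem.Dict.get?_mk_cons, hax]
      subst hax
      simp [hnone, hc, hg]
    · have hc : ({ items := (ak, av) :: t } : PySem.Dict Int Int).contains x
          = ({ items := t } : PySem.Dict Int Int).contains x := by
        simp [PySem.Dict.contains_mk, hax]
      have hg : ({ items := (ak, av) :: t } : PySem.Dict Int Int).getD x 0
          = ({ items := t } : PySem.Dict Int Int).getD x 0 := by
        simp [PySem.Dict.getD, PySem.Dict.get?_mk_cons, hax]
      have := ih htl
      simp only [List.filter_cons, hax, decide_false] at *
      rw [hc, hg]
      exact this

-- conditional-add fold as a sum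
theorem pv_foldl_ite_add (U : List Int) (P : Int → Bool) (v : Int → Int) (c : Int) :
    (U.foldl (fun c u => if P u then c + v u else c) c)
      = c + (U.map (fun u => if P u then v u else 0)).sum := by
  induction U generalizing c with
  | nil => simp
  | cons u U ih =>
    simp only [List.foldl_cons, List.map_cons, List.sum_cons]
    cases hP : P u
    · rw [if_neg (by simp), if_neg (by simp), ih]; omega
    · rw [if_pos (by simp), if_pos (by simp), ih]; omega


theorem pv_compare_sum (U : List Int) (ukd refd : PySem.Dict Int Int) (k : Int) :
    compareHistogram U ukd refd k
      = (U.map (fun u => if refd.contains (PySem.Int.bxor u k) then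
          ukd.getD u 0 * refd.getD (PySem.Int.bxor u k) 0 else 0)).sum := by
  unfold compareHistogram
  simpa using pv_foldl_ite_add U (fun u => refd.contains (PySem.Int.bxor u k))
    (fun u => ukd.getD u 0 * refd.getD (PySem.Int.bxor u k) 0) 0

theorem pv_sum_pairs_one (ukd refd : PySem.Dict Int Int) (h : refd.keys.Nodup) (u k : Int) :
    (((refd.items.map (fun rp => (u, rp))).filter
        (fun p => PySem.Int.bxor p.1 p.2.1 = k)).map
        (fun p => ukd.getD p.1 0 * p.2.2)).sum
      = if refd.contains (PySem.Int.bxor u k) then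
          ukd.getD u 0 * refd.getD (PySem.Int.bxor u k) 0 else 0 := by
  rw [List.filter_map, List.map_map]
  have hfc : refd.items.filter
        ((fun p : Int × (Int × Int) => decide (PySem.Int.bxor p.1 p.2.1 = k)) ∘ (fun rp => (u, rp)))
      = refd.items.filter (fun rp => rp.1 = PySem.Int.bxor u k) :=
    List.filter_congr (fun rp _ => by simp [Function.comp, pv_bxor_eq_iff])
  rw [hfc]
  have hco : ((fun p : Int × (Int × Int) => ukd.getD p.1 0 * p.2.2) ∘ (fun rp : Int × Int => (u, rp)))
      = fun rp : Int × Int => ukd.getD u 0 * rp.2 := rfl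
  rw [hco]
  have hmm : (refd.items.filter (fun rp => rp.1 = PySem.Int.bxor u k)).map
        (fun rp : Int × Int => ukd.getD u 0 * rp.2)
      = ((refd.items.filter (fun rp => rp.1 = PySem.Int.bxor u k)).map
          (fun rp : Int × Int => rp.2)).map (fun v => ukd.getD u 0 * v) := by
    rw [List.map_map]; rfl
  rw [hmm, pv_items_filter_key refd h (PySem.Int.bxor u k)]
  by_cases hc : refd.contains (PySem.Int.bxor u k) <;> simp [hc]

-- the convolution sum over all (u, item) pairs hitting key k IS compareHistogram's count
theorem pv_sum_pairs (U : List Int) (ukd refd : PySem.Dict Int Int) (h : refd.keys.Nodup) (k : Int) :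
    ((((U.flatMap (fun u => refd.items.map (fun rp => (u, rp)))).filter
        (fun p => PySem.Int.bxor p.1 p.2.1 = k)).map
        (fun p => ukd.getD p.1 0 * p.2.2)).sum)
      = compareHistogram U ukd refd k := by
  rw [pv_compare_sum]
  induction U with
  | nil => simp
  | cons u U ih =>
    simp only [List.flatMap_cons, List.filter_append, List.map_append, List.sum_append,
      List.map_cons, List.sum_cons, ih]
    rw [pv_sum_pairs_one ukd refd h u k]

-- ===== VERDICT (by name: the statement is the Claim_ definition above) =====
theorem applyHistogram_spec : Claim_equal_applyHistogram := by
  intro uk_histo ref_histo _hdom _hpre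
  unfold Spec_applyHistogram
  simp only [applyHistogram, applyHistogram_alt]
  set ukd := PySem.Dict.ofList uk_histo with hukd
  set refd := PySem.Dict.ofList ref_histo with hrefd
  set U := PySem.List.sorted ukd.keys (fun u => ukd.getD u 0) true with hU
  have hrn : refd.keys.Nodup := PySem.Dict.nodup_keys_ofList _
  -- both nested folds as folds over the same (u, item)-pair list
  have hA : U.foldl (fun d u =>
        refd.keys.foldl (fun d r =>
          d.insert (PySem.Int.bxor u r) (compareHistogram U ukd refd (PySem.Int.bxor u r))) d)
        PySem.Dict.empty
      = (U.flatMap (fun u => refd.items.map (fun rp => (u, rp)))).foldl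
          (fun d p => d.insert (PySem.Int.bxor p.1 p.2.1)
            (compareHistogram U ukd refd (PySem.Int.bxor p.1 p.2.1))) PySem.Dict.empty := by
    rw [PySem.List.foldl_congr_mem U _
      (fun d u => refd.items.foldl (fun d rp =>
        d.insert (PySem.Int.bxor u rp.1) (compareHistogram U ukd refd (PySem.Int.bxor u rp.1))) d)
      PySem.Dict.empty
      (fun d u _ => by
        conv_lhs => rw [show refd.keys = refd.items.map (fun p => p.1) from rfl]
        rw [List.foldl_map])]
    exact pv_foldl_nested U (fun _ => refd.items)
      (fun d p => d.insert (PySem.Int.bxor p.1 p.2.1)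
        (compareHistogram U ukd refd (PySem.Int.bxor p.1 p.2.1))) PySem.Dict.empty
  have hB : U.foldl (fun d u =>
        refd.items.foldl (fun d rp =>
          d.insert (PySem.Int.bxor u rp.1)
            ((d.getD (PySem.Int.bxor u rp.1) 0) + ukd.getD u 0 * rp.2)) d)
        PySem.Dict.empty
      = (U.flatMap (fun u => refd.items.map (fun rp => (u, rp)))).foldl
          (fun d p => d.insert (PySem.Int.bxor p.1 p.2.1)
            ((d.getD (PySem.Int.bxor p.1 p.2.1) 0) + ukd.getD p.1 0 * p.2.2)) PySem.Dict.empty :=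
    pv_foldl_nested U (fun _ => refd.items)
      (fun d p => d.insert (PySem.Int.bxor p.1 p.2.1)
        ((d.getD (PySem.Int.bxor p.1 p.2.1) 0) + ukd.getD p.1 0 * p.2.2)) PySem.Dict.empty
  rw [hA, hB]
  set PL := U.flatMap (fun u => refd.items.map (fun rp => (u, rp))) with hPL
  set DA := PL.foldl (fun d p => d.insert (PySem.Int.bxor p.1 p.2.1)
      (compareHistogram U ukd refd (PySem.Int.bxor p.1 p.2.1))) PySem.Dict.empty with hDA
  set DB := PL.foldl (fun d p => d.insert (PySem.Int.bxor p.1 p.2.1)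
      ((d.getD (PySem.Int.bxor p.1 p.2.1) 0) + ukd.getD p.1 0 * p.2.2)) PySem.Dict.empty with hDB
  have hkeys : DA.keys = DB.keys :=
    pv_keys_foldl_eq PL (fun p => PySem.Int.bxor p.1 p.2.1)
      (fun _ p => compareHistogram U ukd refd (PySem.Int.bxor p.1 p.2.1))
      (fun d p => (d.getD (PySem.Int.bxor p.1 p.2.1) 0) + ukd.getD p.1 0 * p.2.2)
      PySem.Dict.empty PySem.Dict.empty rfl
  have hvalk : ∀ x ∈ DA.keys, DA.getD x 0 = DB.getD x 0 := by
    intro x hx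
    have hmem : x ∈ PL.map (fun p => PySem.Int.bxor p.1 p.2.1) := by
      rcases (pv_mem_keys_foldl PL (fun p => PySem.Int.bxor p.1 p.2.1)
          (fun _ p => compareHistogram U ukd refd (PySem.Int.bxor p.1 p.2.1))
          PySem.Dict.empty x).mp hx with hc | hc
      · rw [PySem.Dict.keys_empty] at hc; cases hc
      · exact hc
    calc DA.getD x 0
        = if x ∈ PL.map (fun p => PySem.Int.bxor p.1 p.2.1) then
            compareHistogram U ukd refd x else PySem.Dict.empty.getD x 0 :=
          pv_getD_foldl_const PL (fun p => PySem.Int.bxor p.1 p.2.1)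
            (fun x => compareHistogram U ukd refd x) PySem.Dict.empty x
      _ = compareHistogram U ukd refd x := if_pos hmem
      _ = ((PL.filter (fun p => PySem.Int.bxor p.1 p.2.1 = x)).map
            (fun p => ukd.getD p.1 0 * p.2.2)).sum := (pv_sum_pairs U ukd refd hrn x).symm
      _ = PySem.Dict.empty.getD x 0 + ((PL.filter (fun p => PySem.Int.bxor p.1 p.2.1 = x)).map
            (fun p => ukd.getD p.1 0 * p.2.2)).sum := by rw [PySem.Dict.getD_empty]; ring
      _ = DB.getD x 0 :=
          (pv_getD_foldl_acc PL (fun p => PySem.Int.bxor p.1 p.2.1)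
            (fun p => ukd.getD p.1 0 * p.2.2) PySem.Dict.empty x).symm
  have hL : (match PySem.List.sorted DA.keys (fun k => DA.getD k 0) true with
      | [] => (0 : Int)
      | k :: _ => k) = (PySem.List.max? DA.keys (fun k => DA.getD k 0)).getD 0 := by
    rw [← pv_head?_sorted_rev_eq_max?]
    rcases hE : PySem.List.sorted DA.keys (fun k => DA.getD k 0) true with _ | ⟨k, t⟩ <;> simp
  have hR : (match PySem.List.max? DB.keys (fun k => DB.getD k 0) with
      | none => (0 : Int)
      | some k => k) = (PySem.List.max? DB.keys (fun k => DB.getD k 0)).getD 0 := by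
    rcases hE : PySem.List.max? DB.keys (fun k => DB.getD k 0) with _ | k <;> simp
  rw [hL, hR, hkeys,
    pv_max?_congr DB.keys (fun k => DA.getD k 0) (fun k => DB.getD k 0)
      (fun x hx => hvalk x (hkeys ▸ hx))]
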